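-- pv_equiv track=rewrite | github.com/viswateja110/TelegramBot | random question paper generator/safe/RandomQGeneratorV2.py | QuestionClassifier
-- ===== SOURCE A (Python) =====
-- listq=[]
--
-- def QuestionClassifier(quesList,mark):
--     dist={}
--     x=0
--     for j in mark:
--         classifiedList=[]
--         for i in range(len(quesList)):
--             if quesList[i].get("marks")==j:
--                 classifiedList.append(quesList[i])
--         x+=1
--         listq.append(len(classifiedList))
--         dist["sec"+str(x)]=classifiedList
--     return (dist)
-- ===== SOURCE B (Python) =====
-- listq = []
--
-- def QuestionClassifier(quesList, mark):
--     # Bucket every question once by its marks value, then emit sections in mark order.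
--     buckets = {}
--     for q in quesList:
--         buckets.setdefault(q.get("marks"), []).append(q)
--     dist = {}
--     for i, j in enumerate(mark, 1):
--         sec = buckets.get(j, [])
--         listq.append(len(sec))
--         dist["sec" + str(i)] = sec
--     return dist
-- ===== Notes on version B (the rewrite author's own statement) =====
-- stated objective: faster
-- what changed: B buckets the questions by marks value in one pass over quesList into a dict, then emits each section with a single lookup while iterating enumerate(mark, 1), replacing A's full rescan of quesList for every mark.
import Mathlib
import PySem

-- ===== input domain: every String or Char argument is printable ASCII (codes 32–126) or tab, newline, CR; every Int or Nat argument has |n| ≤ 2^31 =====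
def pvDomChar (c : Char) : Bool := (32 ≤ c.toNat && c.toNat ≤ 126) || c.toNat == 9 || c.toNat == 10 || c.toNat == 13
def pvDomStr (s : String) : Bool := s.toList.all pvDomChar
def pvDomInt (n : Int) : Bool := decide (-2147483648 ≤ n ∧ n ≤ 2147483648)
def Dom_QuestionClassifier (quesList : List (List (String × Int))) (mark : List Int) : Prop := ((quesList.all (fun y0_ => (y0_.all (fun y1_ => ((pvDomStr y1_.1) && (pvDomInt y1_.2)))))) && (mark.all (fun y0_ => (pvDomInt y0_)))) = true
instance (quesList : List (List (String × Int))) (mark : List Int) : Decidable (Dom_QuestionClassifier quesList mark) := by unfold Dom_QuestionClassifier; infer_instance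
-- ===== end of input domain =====

-- B buckets the questions by marks value in ONE pass over quesList into a dict and then
-- emits each section with a single lookup while walking enumerate(mark, 1), instead of
-- A's rescan of quesList for every mark.
-- Equivalence is about the RETURN value only: both Pythons also append section lengths
-- to the module-global 'listq' (B performs the same mutation).

-- q.get("marks") : first-match lookup in the question dict (shared by both ports)
def pvMarks (q : List (String × Int)) : Option Int := (PySem.Dict.mk q).get? "marks"

-- ===== PORT A =====
def QuestionClassifier (quesList : List (List (String × Int))) (mark : List Int) : List (String × List (List (String × Int))) :=
  ((mark.foldl (fun (st : PySem.Dict String (List (List (String × Int))) × Int) j =>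
      let classifiedList :=
        (PySem.List.pyRange 0 quesList.length 1).foldl
          (fun acc i =>
            if pvMarks (PySem.List.pyGetD quesList i []) == some j then
              acc ++ [PySem.List.pyGetD quesList i []]
            else acc) []
      let x := st.2 + 1
      (st.1.insert ("sec" ++ PySem.Int.toStr x) classifiedList, x))
    (PySem.Dict.empty, 0)).1).items

-- ===== PORT B =====
-- 'for q in quesList: buckets.setdefault(q.get("marks"), []).append(q)'
def pvBuckets : List (List (String × Int)) → PySem.Dict (Option Int) (List (List (String × Int))) → PySem.Dict (Option Int) (List (List (String × Int)))
  | [], b => b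
  | q :: rest, b => pvBuckets rest (b.modify (pvMarks q) [] (· ++ [q]))

-- 'for i, j in enumerate(mark, 1): dist["sec" + str(i)] = buckets.get(j, [])'
def pvEmit (buckets : PySem.Dict (Option Int) (List (List (String × Int)))) : List (Int × Int) → PySem.Dict String (List (List (String × Int))) → PySem.Dict String (List (List (String × Int)))
  | [], dist => dist
  | (i, j) :: rest, dist => pvEmit buckets rest (dist.insert ("sec" ++ PySem.Int.toStr i) (buckets.getD (some j) []))

def QuestionClassifier_alt (quesList : List (List (String × Int))) (mark : List Int) : List (String × List (List (String × Int))) :=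
  (pvEmit (pvBuckets quesList PySem.Dict.empty) (PySem.List.enumerate mark 1) PySem.Dict.empty).items

-- ===== PRECONDITION & SPEC =====
def Spec_QuestionClassifier (quesList : List (List (String × Int))) (mark : List Int) (out : List (String × List (List (String × Int)))) : Prop := out = QuestionClassifier_alt quesList mark
instance (quesList : List (List (String × Int))) (mark : List Int) (out : List (String × List (List (String × Int)))) : Decidable (Spec_QuestionClassifier quesList mark out) := by unfold Spec_QuestionClassifier; infer_instance

-- ===== CLAIM (what is proved, stated in full; the proofs are below) =====
def Claim_equal_QuestionClassifier : Prop := ∀ (quesList : List (List (String × Int))) (mark : List Int), Dom_QuestionClassifier quesList mark → Spec_QuestionClassifier quesList mark (QuestionClassifier quesList mark)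

-- ===== LEMMAS AND PROOFS =====

-- pvBuckets is the left fold of the modify step
theorem pvBuckets_eq_foldl (l : List (List (String × Int))) (b : PySem.Dict (Option Int) (List (List (String × Int)))) :
    pvBuckets l b = l.foldl (fun b q => b.modify (pvMarks q) [] (· ++ [q])) b := by
  induction l generalizing b with
  | nil => rfl
  | cons q rest ih => simp [pvBuckets, ih]

-- A's inner scan for mark j and B's bucket lookup at j both yield the questions whose
-- "marks" entry equals j, in quesList order.
theorem classified_eq (quesList : List (List (String × Int))) (j : Int) :
    (PySem.List.pyRange 0 quesList.length 1).foldl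
        (fun acc i =>
          if pvMarks (PySem.List.pyGetD quesList i []) == some j then
            acc ++ [PySem.List.pyGetD quesList i []]
          else acc) []
      = (pvBuckets quesList PySem.Dict.empty).getD (some j) [] := by
  rw [pvBuckets_eq_foldl]
  rw [PySem.List.foldl_pyRange_zero_pyGetD' quesList []
        (fun acc q => if pvMarks q == some j then acc ++ [q] else acc) []]
  rw [PySem.List.foldl_append_if_eq_filter]
  have hmap : quesList.foldl (fun b q => b.modify (pvMarks q) [] (· ++ [q]))
      (PySem.Dict.empty : PySem.Dict (Option Int) (List (List (String × Int))))
      = (quesList.map (fun q => (pvMarks q, q))).foldl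
          (fun d p => d.modify p.1 [] (· ++ [p.2])) PySem.Dict.empty := by
    rw [List.foldl_map]
  rw [hmap, PySem.Dict.getD_foldl_modify_append]
  simp [List.filter_map, List.map_map, Function.comp_def]

-- B's emission over enumerate(mark, x+1) is A's counter-carrying fold from state (d, x)
theorem emit_eq (quesList : List (List (String × Int))) (mark : List Int) :
    ∀ (x : Int) (d : PySem.Dict String (List (List (String × Int)))),
    pvEmit (pvBuckets quesList PySem.Dict.empty) (PySem.List.enumerate mark (x + 1)) d
      = (mark.foldl (fun (st : PySem.Dict String (List (List (String × Int))) × Int) j =>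
          let classifiedList :=
            (PySem.List.pyRange 0 quesList.length 1).foldl
              (fun acc i =>
                if pvMarks (PySem.List.pyGetD quesList i []) == some j then
                  acc ++ [PySem.List.pyGetD quesList i []]
                else acc) []
          let x := st.2 + 1
          (st.1.insert ("sec" ++ PySem.Int.toStr x) classifiedList, x)) (d, x)).1 := by
  induction mark with
  | nil => intro x d; simp [PySem.List.enumerate_nil, pvEmit]
  | cons j rest ih =>
    intro x d
    rw [PySem.List.enumerate_cons, List.foldl_cons]
    simp only [pvEmit]
    rw [← classified_eq quesList j]
    exact ih (x + 1) _

theorem QuestionClassifier_eq_alt (quesList : List (List (String × Int))) (mark : List Int) :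
    QuestionClassifier quesList mark = QuestionClassifier_alt quesList mark := by
  unfold QuestionClassifier QuestionClassifier_alt
  have e1 : PySem.List.enumerate mark 1 = PySem.List.enumerate mark (0 + 1) := by norm_num
  rw [e1, emit_eq quesList mark 0 PySem.Dict.empty]

-- ===== VERDICT (by name: the statement is the Claim_ definition above) =====
theorem QuestionClassifier_spec : Claim_equal_QuestionClassifier := by
  intro quesList mark _
  unfold Spec_QuestionClassifier
  exact QuestionClassifier_eq_alt quesList mark
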